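-- pv_equiv track=rewrite | github.com/Rain7232/cli-tclfmt | tclfmt.py | linesReformat
-- ===== SOURCE A (Python) =====
-- def linesReformat(storeLines, index):
--     formattedLines = []
--     maxLen = 0
--     for line in storeLines:
--         words = line.split()
--         if maxLen < len(words[index]):
--             maxLen = len(words[index])
--
--     for line in storeLines:
--         words = line.split()
--         padding = paddingGen(maxLen-len(words[index]))
--         prefix = " ".join(words[:index+1])
--         surfix = " ".join(words[index+1:])
--         newLine = "%s%s %s" % (prefix, padding, surfix)
--         formattedLines.append(newLine)
--
--     return formattedLines
--
-- def paddingGen(cnt):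
--     result = ""
--     for _ in range(cnt):
--         result += " "
--     return result
-- ===== SOURCE B (Python) =====
-- def linesReformat(storeLines, index):
--     # Online single pass: emit each line padded to the widest column seen SO FAR,
--     # remembering where the padding sits; when a wider word arrives, retroactively
--     # widen the already-emitted lines by inserting spaces at the recorded spot.
--     out = []
--     pads = []          # insertion point of the padding in each emitted line
--     maxLen = 0
--     for line in storeLines:
--         w = line.split()
--         k = len(w[index])
--         if k > maxLen:
--             grow = " " * (k - maxLen)
--             out = [o[:p] + grow + o[p:] for o, p in zip(out, pads)]
--             maxLen = k
--         prefix = " ".join(w[:index + 1])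
--         out.append(prefix + " " * (maxLen - k) + " " + " ".join(w[index + 1:]))
--         pads.append(len(prefix))
--     return out
-- ===== Notes on version B (the rewrite author's own statement) =====
-- stated objective: alternative
-- what changed: B is a single online pass: each line is emitted immediately, padded to the widest column word seen so far, and when a wider word arrives the already-emitted lines are retroactively widened by splicing extra spaces in at a recorded insertion point - replacing A's two independent full scans (one for the global max, one to rebuild) and its character-by-character padding loop.
import Mathlib
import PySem

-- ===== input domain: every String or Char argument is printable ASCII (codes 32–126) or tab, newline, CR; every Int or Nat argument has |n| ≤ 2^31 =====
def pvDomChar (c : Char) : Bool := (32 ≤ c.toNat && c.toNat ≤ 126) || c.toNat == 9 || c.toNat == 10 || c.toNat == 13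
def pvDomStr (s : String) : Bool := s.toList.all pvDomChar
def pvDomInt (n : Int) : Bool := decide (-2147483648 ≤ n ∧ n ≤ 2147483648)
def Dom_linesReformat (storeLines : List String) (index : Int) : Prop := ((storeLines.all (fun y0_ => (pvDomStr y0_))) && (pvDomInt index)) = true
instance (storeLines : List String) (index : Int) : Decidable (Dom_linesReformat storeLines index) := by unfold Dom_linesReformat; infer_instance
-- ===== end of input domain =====

-- B replaces A's two staged full scans (global max, then rebuild with a char-by-char padding
-- loop) by ONE online pass that emits each line padded to the widest column word seen so far
-- and retroactively splices extra spaces into already-emitted lines when a wider word arrives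
-- (objective: alternative algorithm, same asymptotic cost on typical input).

-- ===== PORT A =====
-- paddingGen: result = ""; for _ in range(cnt): result += " "
def paddingGen (cnt : Int) : String :=
  (PySem.List.pyRange 0 cnt 1).foldl (fun result _ => result ++ " ") ""

def linesReformat (storeLines : List String) (index : Int) : List String :=
  -- first loop: running maximum of len(words[index]) (pyGetD; Pre_ keeps index in range)
  let maxLen : Int := storeLines.foldl (fun maxLen line =>
      let words := PySem.Str.split₀ line
      if maxLen < PySem.Str.len (PySem.List.pyGetD words index "") then
        PySem.Str.len (PySem.List.pyGetD words index "")
      else maxLen) 0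
  -- second loop: formattedLines.append(newLine)
  storeLines.foldl (fun formattedLines line =>
      let words := PySem.Str.split₀ line
      let padding := paddingGen (maxLen - PySem.Str.len (PySem.List.pyGetD words index ""))
      let prefix_ := PySem.Str.join " " (PySem.List.slice words none (some (index + 1)))
      let surfix := PySem.Str.join " " (PySem.List.slice words (some (index + 1)) none)
      let newLine := prefix_ ++ padding ++ " " ++ surfix
      formattedLines ++ [newLine]) []

-- ===== PORT B =====
-- one loop over storeLines; state = (out, pads, maxLen); " " * n is String.ofList (replicate n ' ')
def linesReformatStep (index : Int) (st : List String × List Int × Int) (line : String) :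
    List String × List Int × Int :=
      let out := st.1; let pads := st.2.1; let maxLen := st.2.2
      let w := PySem.Str.split₀ line
      let k := PySem.Str.len (PySem.List.pyGetD w index "")
      let (out, maxLen) :=
        if maxLen < k then
          let grow := String.ofList (List.replicate (k - maxLen).toNat ' ')
          ((out.zip pads).map (fun op =>
              PySem.Str.slice op.1 none (some op.2) ++ grow ++ PySem.Str.slice op.1 (some op.2) none),
           k)
        else (out, maxLen)
      let prefix_ := PySem.Str.join " " (PySem.List.slice w none (some (index + 1)))
      (out ++ [prefix_ ++ String.ofList (List.replicate (maxLen - k).toNat ' ') ++ " "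
                 ++ PySem.Str.join " " (PySem.List.slice w (some (index + 1)) none)],
       pads ++ [PySem.Str.len prefix_],
       maxLen)

def linesReformat_alt (storeLines : List String) (index : Int) : List String :=
  (storeLines.foldl (linesReformatStep index) ([], [], 0)).1

-- ===== PRECONDITION & SPEC =====
-- Pre_ excludes exactly the inputs where Python's words[index] raises IndexError (a line whose
-- whitespace-split word list does not reach position index).
def Pre_linesReformat (storeLines : List String) (index : Int) : Prop :=
  ∀ line ∈ storeLines, PySem.Raise.InRange (PySem.Str.split₀ line).length index
instance (storeLines : List String) (index : Int) : Decidable (Pre_linesReformat storeLines index) := by unfold Pre_linesReformat; infer_instance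

def pvWitness_linesReformat : List String × Int := (["set x 1", "set longer 22"], 1)

def Spec_linesReformat (storeLines : List String) (index : Int) (out : List String) : Prop := out = linesReformat_alt storeLines index
instance (storeLines : List String) (index : Int) (out : List String) : Decidable (Spec_linesReformat storeLines index out) := by unfold Spec_linesReformat; infer_instance

-- ===== CLAIM (what is proved, stated in full; the proofs are below) =====
def Claim_equal_linesReformat : Prop := ∀ (storeLines : List String) (index : Int), Dom_linesReformat storeLines index → Pre_linesReformat storeLines index → Spec_linesReformat storeLines index (linesReformat storeLines index)

-- ===== LEMMAS AND PROOFS =====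

-- proof-only abbreviations for the per-line pieces
def pvK (index : Int) (line : String) : Int :=
  PySem.Str.len (PySem.List.pyGetD (PySem.Str.split₀ line) index "")
def pvPrefix (index : Int) (line : String) : String :=
  PySem.Str.join " " (PySem.List.slice (PySem.Str.split₀ line) none (some (index + 1)))
def pvSurfix (index : Int) (line : String) : String :=
  PySem.Str.join " " (PySem.List.slice (PySem.Str.split₀ line) (some (index + 1)) none)
def pvRender (index : Int) (m : Int) (line : String) : String :=
  pvPrefix index line ++ String.ofList (List.replicate (m - pvK index line).toNat ' ')
    ++ " " ++ pvSurfix index line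

-- A's character-append loop builds exactly a run of cnt spaces.
theorem paddingGen_foldl (l : List Int) (s : String) :
    l.foldl (fun result _ => result ++ " ") s = s ++ String.ofList (List.replicate l.length ' ') := by
  induction l generalizing s with
  | nil => apply String.toList_inj.mp; simp
  | cons x xs ih =>
      simp only [List.foldl_cons, ih, List.length_cons]
      apply String.toList_inj.mp
      simp [List.replicate_succ]

theorem paddingGen_eq (cnt : Int) :
    paddingGen cnt = String.ofList (List.replicate cnt.toNat ' ') := by
  unfold paddingGen
  rw [paddingGen_foldl]
  apply String.toList_inj.mp
  have hlen : (PySem.List.pyRange 0 cnt 1).length = cnt.toNat := by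
    simp [PySem.List.pyRange]; omega
  simp [hlen]

-- splicing grow into a rendered line at the recorded point widens its padding
theorem splice_render (index : Int) (m k : Int) (line : String)
    (hmk : m < k) (hlm : pvK index line ≤ m) :
    PySem.Str.slice (pvRender index m line) none (some (PySem.Str.len (pvPrefix index line)))
      ++ String.ofList (List.replicate (k - m).toNat ' ')
      ++ PySem.Str.slice (pvRender index m line) (some (PySem.Str.len (pvPrefix index line))) none
    = pvRender index k line := by
  apply String.toList_inj.mp
  have h0 : 0 ≤ pvK index line := by
    simp [pvK]
  simp only [pvRender, PySem.Str.toList_slice, PySem.Str.len_eq, String.toList_append]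
  rw [PySem.Chars.slice_eq_listSlice, PySem.Chars.slice_eq_listSlice,
      PySem.List.slice_to_natCast, PySem.List.slice_from_natCast]
  simp only [List.append_assoc]
  rw [List.take_append_of_le_length (by simp), List.drop_append_of_le_length (by simp)]
  simp only [List.take_length, List.drop_length, List.nil_append]
  have h1 : (k - m).toNat + (m - pvK index line).toNat = (k - pvK index line).toNat := by omega
  simp only [String.toList_ofList]
  rw [← h1, List.replicate_add, List.append_assoc]

-- one step of B's loop preserves the invariant
theorem stepB_eq (index : Int) (acc : List String) (m : Int) (line : String)
    (hm : ∀ l ∈ acc, pvK index l ≤ m) :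
    linesReformatStep index
        (acc.map (pvRender index m), acc.map (fun l => PySem.Str.len (pvPrefix index l)), m) line
      = ((acc ++ [line]).map (pvRender index (max m (pvK index line))),
         (acc ++ [line]).map (fun l => PySem.Str.len (pvPrefix index l)),
         max m (pvK index line)) := by
  simp only [linesReformatStep]
  split_ifs with hlt
  · have hlt' : m < pvK index line := by simpa [pvK] using hlt
    have hmax : max m (pvK index line) = pvK index line := by omega
    have hzip :
        ((acc.map (pvRender index m)).zip
            (acc.map (fun l => PySem.Str.len (pvPrefix index l)))).map
          (fun op => PySem.Str.slice op.1 none (some op.2)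
              ++ String.ofList (List.replicate (pvK index line - m).toNat ' ')
              ++ PySem.Str.slice op.1 (some op.2) none)
          = acc.map (pvRender index (pvK index line)) := by
      rw [List.zip_map', List.map_map]
      apply List.map_congr_left
      intro l hl
      exact splice_render index m (pvK index line) l hlt' (hm l hl)
    rw [hmax]
    simp only [pvK] at hzip ⊢
    rw [hzip]
    simp [pvRender, pvPrefix, pvSurfix, pvK]
  · have hlt' : ¬ m < pvK index line := by simpa [pvK] using hlt
    have hmax : max m (pvK index line) = m := by omega
    rw [hmax]
    simp [pvRender, pvPrefix, pvSurfix, pvK]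

-- the invariant of B's single pass
theorem b_fold_invariant (index : Int) (ls acc : List String) (m : Int)
    (hm : ∀ l ∈ acc, pvK index l ≤ m) :
    ls.foldl (linesReformatStep index)
      (acc.map (pvRender index m), acc.map (fun l => PySem.Str.len (pvPrefix index l)), m)
    = ((acc ++ ls).map (pvRender index (ls.foldl (fun m l => max m (pvK index l)) m)),
       (acc ++ ls).map (fun l => PySem.Str.len (pvPrefix index l)),
       ls.foldl (fun m l => max m (pvK index l)) m) := by
  induction ls generalizing acc m with
  | nil => simp
  | cons line rest ih =>
      simp only [List.foldl_cons]
      rw [stepB_eq index acc m line hm]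
      rw [ih (acc ++ [line]) (max m (pvK index line))
        (by intro l hl
            rcases List.mem_append.mp hl with h | h
            · exact le_trans (hm l h) (le_max_left _ _)
            · simp at h; subst h; exact le_max_right _ _)]
      simp [List.append_assoc]

-- A's conditional running-maximum update is a fold of `max`.
theorem foldl_if_max (f : String → Int) (l : List String) (init : Int) :
    l.foldl (fun m line => if m < f line then f line else m) init
      = l.foldl (fun m line => max m (f line)) init := by
  induction l generalizing init with
  | nil => rfl
  | cons x xs ih =>
      simp only [List.foldl_cons, ih]
      congr 1
      omega

-- ===== VERDICT (by name: the statement is the Claim_ definition above) =====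
theorem linesReformat_spec : Claim_equal_linesReformat := by
  intro storeLines index _ _
  unfold Spec_linesReformat linesReformat linesReformat_alt
  have hb := b_fold_invariant index storeLines [] 0 (by intro l hl; simp at hl)
  simp only [List.map_nil, List.nil_append] at hb
  rw [hb]
  simp only [foldl_if_max (fun line =>
      PySem.Str.len (PySem.List.pyGetD (PySem.Str.split₀ line) index "")) storeLines 0,
    PySem.List.foldl_append_singleton_eq_map, List.nil_append]
  apply List.map_congr_left
  intro line _
  simp only [paddingGen_eq, pvRender, pvPrefix, pvSurfix, pvK]
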